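-- pv_equiv track=rewrite | github.com/Adamset12/apuntsProgramacio | perexam/pt3-AlemanJofre-BenAhmedAdam-BenitezAxel-ASIXc1A/R3.1/crazy_words.py | arreglar_frase
-- ===== SOURCE A (Python) =====
-- def arreglar_frase(frase):
--     result = []
--     current_word = ""
--     for char in frase:
--         if char.isalpha():
--             current_word += char
--         elif current_word:
--             result.append(current_word)
--             current_word = ""
--     if current_word:
--         result.append(current_word)
--     return frase, result
-- ===== SOURCE B (Python) =====
-- def arreglar_frase(frase):
--     result = []
--     i, n = 0, len(frase)
--     while i < n:
--         if frase[i].isalpha():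
--             j = i + 1
--             while j < n and frase[j].isalpha():   # span of the alphabetic run
--                 j += 1
--             result.append(frase[i:j])
--             i = j
--         else:
--             i += 1
--     return frase, result
-- ===== Notes on version B (the rewrite author's own statement) =====
-- stated objective: alternative
-- what changed: Replaces the character-accumulator loop with flush-on-boundary logic by two-pointer extraction of maximal alphabetic runs, slicing each whole word out at once instead of growing a current_word character by character.
import Mathlib
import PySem

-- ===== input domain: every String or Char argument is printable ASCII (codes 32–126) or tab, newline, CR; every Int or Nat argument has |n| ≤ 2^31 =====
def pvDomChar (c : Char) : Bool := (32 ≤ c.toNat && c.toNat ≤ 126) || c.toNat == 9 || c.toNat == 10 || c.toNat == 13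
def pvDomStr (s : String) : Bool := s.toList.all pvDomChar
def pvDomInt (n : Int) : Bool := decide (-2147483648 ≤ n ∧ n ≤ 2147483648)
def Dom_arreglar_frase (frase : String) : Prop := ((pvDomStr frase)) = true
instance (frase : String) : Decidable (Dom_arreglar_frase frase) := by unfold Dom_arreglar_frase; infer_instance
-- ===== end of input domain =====

-- ===== PORT A =====
-- B replaces A's accumulator loop (flush-on-boundary) by structural recursion
-- extracting maximal alphabetic runs; alternative decomposition, same cost.
def pvStepA (st : List String × List Char) (c : Char) : List String × List Char :=
  if PySem.Chars.isalpha c then (st.1, st.2 ++ [c])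
  else if st.2 ≠ [] then (st.1 ++ [String.ofList st.2], []) else (st.1, st.2)

def pvFlush (st : List String × List Char) : List String :=
  if st.2 ≠ [] then st.1 ++ [String.ofList st.2] else st.1

def arreglar_frase (frase : String) : String × List String :=
  (frase, pvFlush (frase.toList.foldl pvStepA ([], [])))

-- ===== PORT B =====
def pvSpanAlpha : List Char → List Char × List Char
  | [] => ([], [])
  | c :: cs => if PySem.Chars.isalpha c then
      let p := pvSpanAlpha cs; (c :: p.1, p.2)
    else ([], c :: cs)

theorem pvSpanAlpha_snd_le : ∀ cs : List Char, (pvSpanAlpha cs).2.length ≤ cs.length := by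
  intro cs
  induction cs with
  | nil => simp [pvSpanAlpha]
  | cons c cs ih =>
    simp only [pvSpanAlpha]
    split
    · simpa using Nat.le_succ_of_le ih
    · simp

def pvWords : List Char → List String
  | [] => []
  | c :: cs =>
    if PySem.Chars.isalpha c then
      String.ofList (c :: (pvSpanAlpha cs).1) :: pvWords (pvSpanAlpha cs).2
    else pvWords cs
termination_by l => l.length
decreasing_by
  · exact Nat.lt_succ_of_le (pvSpanAlpha_snd_le cs)
  · exact Nat.lt_succ_self _

def arreglar_frase_alt (frase : String) : String × List String :=
  (frase, pvWords frase.toList)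

-- ===== PRECONDITION & SPEC =====
def Spec_arreglar_frase (frase : String) (out : String × List String) : Prop := out = arreglar_frase_alt frase
instance (frase : String) (out : String × List String) : Decidable (Spec_arreglar_frase frase out) := by unfold Spec_arreglar_frase; infer_instance

-- ===== CLAIM (what is proved, stated in full; the proofs are below) =====
def Claim_equal_arreglar_frase : Prop := ∀ (frase : String), Dom_arreglar_frase frase → Spec_arreglar_frase frase (arreglar_frase frase)

-- ===== LEMMAS AND PROOFS =====
theorem pvLoop_key : ∀ (cs : List Char) (res : List String) (cur : List Char),
    pvFlush (cs.foldl pvStepA (res, cur)) =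
      res ++ (if cur = [] then pvWords cs
              else String.ofList (cur ++ (pvSpanAlpha cs).1) :: pvWords (pvSpanAlpha cs).2) := by
  intro cs
  induction cs with
  | nil =>
    intro res cur
    cases cur with
    | nil => simp [pvFlush, pvWords]
    | cons a l => simp [pvFlush, pvSpanAlpha, pvWords]
  | cons c cs ih =>
    intro res cur
    by_cases h : PySem.Chars.isalpha c = true
    · simp only [List.foldl_cons, pvStepA, h, if_pos]
      rw [ih]
      cases cur with
      | nil => simp [pvWords, h]
      | cons a l => simp [pvSpanAlpha, h]
    · simp only [List.foldl_cons, pvStepA, h, Bool.false_eq_true, ite_false]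
      cases cur with
      | nil =>
        simp only [ne_eq, not_true_eq_false, ite_false]
        rw [ih]
        simp [pvWords, h]
      | cons a l =>
        simp only [ne_eq, reduceCtorEq, not_false_eq_true, if_pos]
        rw [ih]
        simp [pvWords, pvSpanAlpha, h]

-- ===== VERDICT (by name: the statement is the Claim_ definition above) =====
theorem arreglar_frase_spec : Claim_equal_arreglar_frase := by
  intro frase _
  unfold Spec_arreglar_frase arreglar_frase arreglar_frase_alt
  rw [pvLoop_key]
  simp
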